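-- pv_equiv track=rewrite | github.com/loboh67/Bank-App | categorization/categorize.py | apply_rule_based_category
-- ===== SOURCE A (Python) =====
-- from typing import Optional
--
-- def apply_rule_based_category(desc: str, direction: Optional[str]) -> Optional[str]:
--     d = desc
--     dir_up = (direction or "").upper()
--
--     # 1) salário / subsídios
--     if dir_up == "CREDIT":
--         if any(x in d for x in ["subsidio natal", "subsidio", "salario", "vencimento"]):
--             return "salary"
--         if "wit software" in d:
--             return "salary"
--
--     # 2) investimentos
--     if "to flexible cash funds" in d or "to robo portfolio" in d:
--         return "investments"
--
--     # 3) transferencias internas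
--     if "apple pay top-up" in d or "top-up" in d:
--         return "transfers_internal"
--
--     # 4) transferencias externas
--     if "sent from revolut" in d:
--         return "transfers_external"
--
--     # 5) levantamentos
--     if d.startswith("cash at"):
--         return "cash_withdrawal"
--
--     # 6) transportes
--     if "uber" in d:
--         return "transport"
--
--     # 7) fast food
--     if "mcdonalds" in d:
--         return "fast_food"
--
--     # 8) restauração / bares
--     if any(x in d for x in ["tasca", "capicci"]):
--         return "food_drink"
--
--     # 9) subscricoes
--     if any(x in d for x in ["apple.com/bill", "spotify", "amazon prime"]):
--         return "subscriptions"
--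
--     # 10) software
--     if "jetbrains" in d:
--         return "software"
--     if "wit software" in d and dir_up == "DEBIT":
--         return "software"
--
--     # 11) entertainment
--     if "playstation network" in d:
--         return "entertainment"
--
--     # 12) viagens
--     if any(x in d for x in ["booking.com", "salamancayfiesta.com"]):
--         return "travel"
--
--     # 13) shopping
--     if any(x in d for x in ["shein", "amazon.es", "klarna*pcdiga", "douglas", "moeve"]):
--         return "shopping"
--
--     return None  # não encontrou regra
-- ===== SOURCE B (Python) =====
-- from typing import Optional
--
-- # Collect-and-select rewrite: every substring rule is an independent candidate
-- # (pattern, direction gate, priority, category); B scans them all, keeps the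
-- # minimum-priority match, merges the one prefix rule afterwards.  No ordered
-- # first-match chain: rule precedence lives in the numeric priorities.
-- CANDIDATES = [
--     ("subsidio natal", "CREDIT", 0, "salary"),
--     ("subsidio", "CREDIT", 0, "salary"),
--     ("salario", "CREDIT", 0, "salary"),
--     ("vencimento", "CREDIT", 0, "salary"),
--     ("wit software", "CREDIT", 0, "salary"),
--     ("to flexible cash funds", None, 1, "investments"),
--     ("to robo portfolio", None, 1, "investments"),
--     ("apple pay top-up", None, 2, "transfers_internal"),
--     ("top-up", None, 2, "transfers_internal"),
--     ("sent from revolut", None, 3, "transfers_external"),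
--     # priority 4 is the "cash at" prefix rule, handled below
--     ("uber", None, 5, "transport"),
--     ("mcdonalds", None, 6, "fast_food"),
--     ("tasca", None, 7, "food_drink"),
--     ("capicci", None, 7, "food_drink"),
--     ("apple.com/bill", None, 8, "subscriptions"),
--     ("spotify", None, 8, "subscriptions"),
--     ("amazon prime", None, 8, "subscriptions"),
--     ("jetbrains", None, 9, "software"),
--     ("wit software", "DEBIT", 9, "software"),
--     ("playstation network", None, 10, "entertainment"),
--     ("booking.com", None, 11, "travel"),
--     ("salamancayfiesta.com", None, 11, "travel"),
--     ("shein", None, 12, "shopping"),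
--     ("amazon.es", None, 12, "shopping"),
--     ("klarna*pcdiga", None, 12, "shopping"),
--     ("douglas", None, 12, "shopping"),
--     ("moeve", None, 12, "shopping"),
-- ]
--
-- def apply_rule_based_category(desc: str, direction: Optional[str]) -> Optional[str]:
--     dir_up = (direction or "").upper()
--     best = None  # (priority, category) of the best match so far
--     for pat, gate, prio, cat in CANDIDATES:
--         if (gate is None or dir_up == gate) and pat in desc:
--             if best is None or prio < best[0]:
--                 best = (prio, cat)
--     if desc.startswith("cash at") and (best is None or 4 < best[0]):
--         best = (4, "cash_withdrawal")
--     return best[1] if best is not None else None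
-- ===== Notes on version B (the rewrite author's own statement) =====
-- stated objective: alternative
-- what changed: Replaces A's ordered first-match if/return chain by collect-and-select: every substring rule becomes an independent (pattern, gate, priority, category) candidate, one pass keeps the minimum-priority match, and the single prefix rule is merged afterwards by the same priority comparison.
import Mathlib
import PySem

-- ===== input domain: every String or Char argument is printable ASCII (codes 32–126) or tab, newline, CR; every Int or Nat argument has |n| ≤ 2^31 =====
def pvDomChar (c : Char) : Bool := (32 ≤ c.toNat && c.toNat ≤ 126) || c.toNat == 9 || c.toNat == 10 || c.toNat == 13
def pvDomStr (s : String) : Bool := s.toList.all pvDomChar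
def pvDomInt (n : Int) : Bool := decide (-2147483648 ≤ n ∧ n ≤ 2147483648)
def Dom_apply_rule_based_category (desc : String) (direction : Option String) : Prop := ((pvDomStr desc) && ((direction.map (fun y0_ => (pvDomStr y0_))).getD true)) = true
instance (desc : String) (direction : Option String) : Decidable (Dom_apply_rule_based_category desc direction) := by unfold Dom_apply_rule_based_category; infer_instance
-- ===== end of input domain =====

-- B replaces A's ordered first-match if/return chain by collect-and-select:
-- every substring rule is an independent (pattern, gate, priority, category)
-- candidate, one pass keeps the minimum-priority match, and the single prefix
-- rule is merged afterwards by the same priority comparison (alternative).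

-- ===== PORT A =====
def apply_rule_based_category (desc : String) (direction : Option String) : Option String :=
  let d := desc
  let dir_up := PySem.Str.upper (direction.getD "")
  if dir_up == "CREDIT" &&
      (["subsidio natal", "subsidio", "salario", "vencimento"].any (fun x => PySem.Str.isIn x d)) then
    some "salary"
  else if dir_up == "CREDIT" && PySem.Str.isIn "wit software" d then
    some "salary"
  else if PySem.Str.isIn "to flexible cash funds" d || PySem.Str.isIn "to robo portfolio" d then
    some "investments"
  else if PySem.Str.isIn "apple pay top-up" d || PySem.Str.isIn "top-up" d then
    some "transfers_internal"
  else if PySem.Str.isIn "sent from revolut" d then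
    some "transfers_external"
  else if PySem.Str.startswith d "cash at" then
    some "cash_withdrawal"
  else if PySem.Str.isIn "uber" d then
    some "transport"
  else if PySem.Str.isIn "mcdonalds" d then
    some "fast_food"
  else if ["tasca", "capicci"].any (fun x => PySem.Str.isIn x d) then
    some "food_drink"
  else if ["apple.com/bill", "spotify", "amazon prime"].any (fun x => PySem.Str.isIn x d) then
    some "subscriptions"
  else if PySem.Str.isIn "jetbrains" d then
    some "software"
  else if PySem.Str.isIn "wit software" d && dir_up == "DEBIT" then
    some "software"
  else if PySem.Str.isIn "playstation network" d then
    some "entertainment"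
  else if ["booking.com", "salamancayfiesta.com"].any (fun x => PySem.Str.isIn x d) then
    some "travel"
  else if ["shein", "amazon.es", "klarna*pcdiga", "douglas", "moeve"].any (fun x => PySem.Str.isIn x d) then
    some "shopping"
  else
    none

-- ===== PORT B =====
-- Source B's CANDIDATES table: (pattern, direction gate, priority, category)
def pvCands : List (String × Option String × Int × String) :=
  [("subsidio natal", some "CREDIT", (0 : Int), "salary"),
   ("subsidio", some "CREDIT", (0 : Int), "salary"),
   ("salario", some "CREDIT", (0 : Int), "salary"),
   ("vencimento", some "CREDIT", (0 : Int), "salary"),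
   ("wit software", some "CREDIT", (0 : Int), "salary"),
   ("to flexible cash funds", none, (1 : Int), "investments"),
   ("to robo portfolio", none, (1 : Int), "investments"),
   ("apple pay top-up", none, (2 : Int), "transfers_internal"),
   ("top-up", none, (2 : Int), "transfers_internal"),
   ("sent from revolut", none, (3 : Int), "transfers_external"),
   ("uber", none, (5 : Int), "transport"),
   ("mcdonalds", none, (6 : Int), "fast_food"),
   ("tasca", none, (7 : Int), "food_drink"),
   ("capicci", none, (7 : Int), "food_drink"),
   ("apple.com/bill", none, (8 : Int), "subscriptions"),
   ("spotify", none, (8 : Int), "subscriptions"),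
   ("amazon prime", none, (8 : Int), "subscriptions"),
   ("jetbrains", none, (9 : Int), "software"),
   ("wit software", some "DEBIT", (9 : Int), "software"),
   ("playstation network", none, (10 : Int), "entertainment"),
   ("booking.com", none, (11 : Int), "travel"),
   ("salamancayfiesta.com", none, (11 : Int), "travel"),
   ("shein", none, (12 : Int), "shopping"),
   ("amazon.es", none, (12 : Int), "shopping"),
   ("klarna*pcdiga", none, (12 : Int), "shopping"),
   ("douglas", none, (12 : Int), "shopping"),
   ("moeve", none, (12 : Int), "shopping")]

-- one step of Source B's loop: keep the minimum-priority matching candidate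
def pvStep (desc : String) (dir_up : String) (best : Option (Int × String))
    (e : String × Option String × Int × String) : Option (Int × String) :=
  if ((match e.2.1 with | none => true | some g => dir_up == g) && PySem.Str.isIn e.1 desc) then
    (match best with
     | none => some (e.2.2.1, e.2.2.2)
     | some b => if e.2.2.1 < b.1 then some (e.2.2.1, e.2.2.2) else some b)
  else best

def apply_rule_based_category_alt (desc : String) (direction : Option String) : Option String :=
  let dir_up := PySem.Str.upper (direction.getD "")
  let best := pvCands.foldl (pvStep desc dir_up) none
  let best := if PySem.Str.startswith desc "cash at" &&
        (match best with | none => true | some b => decide (4 < b.1)) then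
      some ((4 : Int), "cash_withdrawal")
    else best
  match best with
  | none => none
  | some b => some b.2

-- ===== PRECONDITION & SPEC =====
def Spec_apply_rule_based_category (desc : String) (direction : Option String) (out : Option String) : Prop := out = apply_rule_based_category_alt desc direction
instance (desc : String) (direction : Option String) (out : Option String) : Decidable (Spec_apply_rule_based_category desc direction out) := by unfold Spec_apply_rule_based_category; infer_instance

-- ===== CLAIM (what is proved, stated in full; the proofs are below) =====
def Claim_equal_apply_rule_based_category : Prop := ∀ (desc : String) (direction : Option String), Dom_apply_rule_based_category desc direction → Spec_apply_rule_based_category desc direction (apply_rule_based_category desc direction)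

-- ===== LEMMAS AND PROOFS =====

-- best is none or has priority above 4 (the "cash at" rule's priority)
def pvGt4 (o : Option (Int × String)) : Prop := ∀ b : Int × String, o = some b → 4 < b.1

-- Source B's loop keeps the state above priority 4 when every firing candidate is
lemma pvFold_gt4 (desc up : String) :
    ∀ (l : List (String × Option String × Int × String)),
      (∀ e ∈ l, ((match e.2.1 with | none => true | some g => up == g) && PySem.Str.isIn e.1 desc) = true → 4 < e.2.2.1) →
      ∀ best, pvGt4 best → pvGt4 (l.foldl (pvStep desc up) best)
  | [], _, best, hb => hb
  | e :: l, hl, best, hb => by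
    apply pvFold_gt4 desc up l (fun e' he' => hl e' (List.mem_cons_of_mem _ he'))
    unfold pvStep pvGt4
    intro b hbeq
    by_cases hcond : ((match e.2.1 with | none => true | some g => up == g) && PySem.Str.isIn e.1 desc) = true
    · have h4 := hl e (List.mem_cons_self) hcond
      rw [if_pos hcond] at hbeq
      cases hbest : best with
      | none =>
        rw [hbest] at hbeq
        rw [← Option.some.inj hbeq]; exact h4
      | some b0 =>
        have hb0 := hb b0 hbest
        rw [hbest] at hbeq
        simp only [] at hbeq
        by_cases hlt : e.2.2.1 < b0.1
        · rw [if_pos hlt] at hbeq; rw [← Option.some.inj hbeq]; exact h4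
        · rw [if_neg hlt] at hbeq; rw [← Option.some.inj hbeq]; exact hb0
    · rw [if_neg hcond] at hbeq
      exact hb b hbeq

-- when no candidate of priority ≤ 4 fires and desc starts with "cash at",
-- B returns the prefix rule's category
lemma pvAlt_cash (desc : String) (direction : Option String)
    (hcash : PySem.Str.startswith desc "cash at" = true)
    (hlow : ∀ e ∈ pvCands, e.2.2.1 ≤ 4 →
      ((match e.2.1 with | none => true | some g => PySem.Str.upper (direction.getD "") == g) && PySem.Str.isIn e.1 desc) = false) :
    apply_rule_based_category_alt desc direction = some "cash_withdrawal" := by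
  have hg : pvGt4 (pvCands.foldl (pvStep desc (PySem.Str.upper (direction.getD ""))) none) := by
    apply pvFold_gt4
    · intro e he hcond
      by_cases h4 : e.2.2.1 ≤ 4
      · rw [hlow e he h4] at hcond; exact absurd hcond (by simp)
      · omega
    · intro b hb; exact absurd hb (by simp)
  unfold apply_rule_based_category_alt
  cases hF : pvCands.foldl (pvStep desc (PySem.Str.upper (direction.getD ""))) none with
  | none => simp only [hF, hcash]; simp
  | some b =>
    have h4b := hg b hF
    simp only [hF, hcash]
    simp [h4b]

-- ===== VERDICT (by name: the statement is the Claim_ definition above) =====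
set_option maxHeartbeats 4000000 in
theorem apply_rule_based_category_spec : Claim_equal_apply_rule_based_category := by
  intro desc direction _
  unfold Spec_apply_rule_based_category
  by_cases hc : PySem.Str.upper (direction.getD "") = "CREDIT"
  ·
    by_cases hnatal : PySem.Str.isIn "subsidio natal" desc = true
    · unfold apply_rule_based_category apply_rule_based_category_alt; simp_all [pvCands, pvStep, List.foldl_cons, List.foldl_nil]
    ·
      by_cases hsub : PySem.Str.isIn "subsidio" desc = true
      · unfold apply_rule_based_category apply_rule_based_category_alt; simp_all [pvCands, pvStep, List.foldl_cons, List.foldl_nil]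
      ·
        by_cases hsal : PySem.Str.isIn "salario" desc = true
        · unfold apply_rule_based_category apply_rule_based_category_alt; simp_all [pvCands, pvStep, List.foldl_cons, List.foldl_nil]
        ·
          by_cases hvenc : PySem.Str.isIn "vencimento" desc = true
          · unfold apply_rule_based_category apply_rule_based_category_alt; simp_all [pvCands, pvStep, List.foldl_cons, List.foldl_nil]
          ·
            by_cases hwit : PySem.Str.isIn "wit software" desc = true
            · unfold apply_rule_based_category apply_rule_based_category_alt; simp_all [pvCands, pvStep, List.foldl_cons, List.foldl_nil]
            ·
              by_cases hflex : PySem.Str.isIn "to flexible cash funds" desc = true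
              · unfold apply_rule_based_category apply_rule_based_category_alt; simp_all [pvCands, pvStep, List.foldl_cons, List.foldl_nil]
              ·
                by_cases hrobo : PySem.Str.isIn "to robo portfolio" desc = true
                · unfold apply_rule_based_category apply_rule_based_category_alt; simp_all [pvCands, pvStep, List.foldl_cons, List.foldl_nil]
                ·
                  by_cases hapt : PySem.Str.isIn "apple pay top-up" desc = true
                  · unfold apply_rule_based_category apply_rule_based_category_alt; simp_all [pvCands, pvStep, List.foldl_cons, List.foldl_nil]
                  ·
                    by_cases htopup : PySem.Str.isIn "top-up" desc = true
                    · unfold apply_rule_based_category apply_rule_based_category_alt; simp_all [pvCands, pvStep, List.foldl_cons, List.foldl_nil]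
                    ·
                      by_cases hsent : PySem.Str.isIn "sent from revolut" desc = true
                      · unfold apply_rule_based_category apply_rule_based_category_alt; simp_all [pvCands, pvStep, List.foldl_cons, List.foldl_nil]
                      ·
                        by_cases hcash : PySem.Str.startswith desc "cash at" = true
                        · have hB := pvAlt_cash desc direction hcash (by intro e he h4; fin_cases he <;> simp_all)
                          rw [hB]; unfold apply_rule_based_category; simp_all
                        ·
                          by_cases huber : PySem.Str.isIn "uber" desc = true
                          · unfold apply_rule_based_category apply_rule_based_category_alt; simp_all [pvCands, pvStep, List.foldl_cons, List.foldl_nil]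
                          ·
                            by_cases hmcd : PySem.Str.isIn "mcdonalds" desc = true
                            · unfold apply_rule_based_category apply_rule_based_category_alt; simp_all [pvCands, pvStep, List.foldl_cons, List.foldl_nil]
                            ·
                              by_cases htasca : PySem.Str.isIn "tasca" desc = true
                              · unfold apply_rule_based_category apply_rule_based_category_alt; simp_all [pvCands, pvStep, List.foldl_cons, List.foldl_nil]
                              ·
                                by_cases hcap : PySem.Str.isIn "capicci" desc = true
                                · unfold apply_rule_based_category apply_rule_based_category_alt; simp_all [pvCands, pvStep, List.foldl_cons, List.foldl_nil]
                                ·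
                                  by_cases hbill : PySem.Str.isIn "apple.com/bill" desc = true
                                  · unfold apply_rule_based_category apply_rule_based_category_alt; simp_all [pvCands, pvStep, List.foldl_cons, List.foldl_nil]
                                  ·
                                    by_cases hspot : PySem.Str.isIn "spotify" desc = true
                                    · unfold apply_rule_based_category apply_rule_based_category_alt; simp_all [pvCands, pvStep, List.foldl_cons, List.foldl_nil]
                                    ·
                                      by_cases hprime : PySem.Str.isIn "amazon prime" desc = true
                                      · unfold apply_rule_based_category apply_rule_based_category_alt; simp_all [pvCands, pvStep, List.foldl_cons, List.foldl_nil]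
                                      ·
                                        by_cases hjet : PySem.Str.isIn "jetbrains" desc = true
                                        · unfold apply_rule_based_category apply_rule_based_category_alt; simp_all [pvCands, pvStep, List.foldl_cons, List.foldl_nil]
                                        ·
                                          by_cases hps : PySem.Str.isIn "playstation network" desc = true
                                          · unfold apply_rule_based_category apply_rule_based_category_alt; simp_all [pvCands, pvStep, List.foldl_cons, List.foldl_nil]
                                          ·
                                            by_cases hbook : PySem.Str.isIn "booking.com" desc = true
                                            · unfold apply_rule_based_category apply_rule_based_category_alt; simp_all [pvCands, pvStep, List.foldl_cons, List.foldl_nil]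
                                            ·
                                              by_cases hsala : PySem.Str.isIn "salamancayfiesta.com" desc = true
                                              · unfold apply_rule_based_category apply_rule_based_category_alt; simp_all [pvCands, pvStep, List.foldl_cons, List.foldl_nil]
                                              ·
                                                by_cases hshein : PySem.Str.isIn "shein" desc = true
                                                · unfold apply_rule_based_category apply_rule_based_category_alt; simp_all [pvCands, pvStep, List.foldl_cons, List.foldl_nil]
                                                ·
                                                  by_cases hes : PySem.Str.isIn "amazon.es" desc = true
                                                  · unfold apply_rule_based_category apply_rule_based_category_alt; simp_all [pvCands, pvStep, List.foldl_cons, List.foldl_nil]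
                                                  ·
                                                    by_cases hklarna : PySem.Str.isIn "klarna*pcdiga" desc = true
                                                    · unfold apply_rule_based_category apply_rule_based_category_alt; simp_all [pvCands, pvStep, List.foldl_cons, List.foldl_nil]
                                                    ·
                                                      by_cases hdoug : PySem.Str.isIn "douglas" desc = true
                                                      · unfold apply_rule_based_category apply_rule_based_category_alt; simp_all [pvCands, pvStep, List.foldl_cons, List.foldl_nil]
                                                      ·
                                                        by_cases hmoeve : PySem.Str.isIn "moeve" desc = true
                                                        · unfold apply_rule_based_category apply_rule_based_category_alt; simp_all [pvCands, pvStep, List.foldl_cons, List.foldl_nil]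
                                                        ·
                                                          unfold apply_rule_based_category apply_rule_based_category_alt; simp_all [pvCands, pvStep, List.foldl_cons, List.foldl_nil]
  · by_cases hd : PySem.Str.upper (direction.getD "") = "DEBIT"
    ·
      by_cases hflex : PySem.Str.isIn "to flexible cash funds" desc = true
      · unfold apply_rule_based_category apply_rule_based_category_alt; simp_all [pvCands, pvStep, List.foldl_cons, List.foldl_nil]
      ·
        by_cases hrobo : PySem.Str.isIn "to robo portfolio" desc = true
        · unfold apply_rule_based_category apply_rule_based_category_alt; simp_all [pvCands, pvStep, List.foldl_cons, List.foldl_nil]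
        ·
          by_cases hapt : PySem.Str.isIn "apple pay top-up" desc = true
          · unfold apply_rule_based_category apply_rule_based_category_alt; simp_all [pvCands, pvStep, List.foldl_cons, List.foldl_nil]
          ·
            by_cases htopup : PySem.Str.isIn "top-up" desc = true
            · unfold apply_rule_based_category apply_rule_based_category_alt; simp_all [pvCands, pvStep, List.foldl_cons, List.foldl_nil]
            ·
              by_cases hsent : PySem.Str.isIn "sent from revolut" desc = true
              · unfold apply_rule_based_category apply_rule_based_category_alt; simp_all [pvCands, pvStep, List.foldl_cons, List.foldl_nil]
              ·
                by_cases hcash : PySem.Str.startswith desc "cash at" = true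
                · have hB := pvAlt_cash desc direction hcash (by intro e he h4; fin_cases he <;> simp_all)
                  rw [hB]; unfold apply_rule_based_category; simp_all
                ·
                  by_cases huber : PySem.Str.isIn "uber" desc = true
                  · unfold apply_rule_based_category apply_rule_based_category_alt; simp_all [pvCands, pvStep, List.foldl_cons, List.foldl_nil]
                  ·
                    by_cases hmcd : PySem.Str.isIn "mcdonalds" desc = true
                    · unfold apply_rule_based_category apply_rule_based_category_alt; simp_all [pvCands, pvStep, List.foldl_cons, List.foldl_nil]
                    ·
                      by_cases htasca : PySem.Str.isIn "tasca" desc = true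
                      · unfold apply_rule_based_category apply_rule_based_category_alt; simp_all [pvCands, pvStep, List.foldl_cons, List.foldl_nil]
                      ·
                        by_cases hcap : PySem.Str.isIn "capicci" desc = true
                        · unfold apply_rule_based_category apply_rule_based_category_alt; simp_all [pvCands, pvStep, List.foldl_cons, List.foldl_nil]
                        ·
                          by_cases hbill : PySem.Str.isIn "apple.com/bill" desc = true
                          · unfold apply_rule_based_category apply_rule_based_category_alt; simp_all [pvCands, pvStep, List.foldl_cons, List.foldl_nil]
                          ·
                            by_cases hspot : PySem.Str.isIn "spotify" desc = true
                            · unfold apply_rule_based_category apply_rule_based_category_alt; simp_all [pvCands, pvStep, List.foldl_cons, List.foldl_nil]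
                            ·
                              by_cases hprime : PySem.Str.isIn "amazon prime" desc = true
                              · unfold apply_rule_based_category apply_rule_based_category_alt; simp_all [pvCands, pvStep, List.foldl_cons, List.foldl_nil]
                              ·
                                by_cases hjet : PySem.Str.isIn "jetbrains" desc = true
                                · unfold apply_rule_based_category apply_rule_based_category_alt; simp_all [pvCands, pvStep, List.foldl_cons, List.foldl_nil]
                                ·
                                  by_cases hwit : PySem.Str.isIn "wit software" desc = true
                                  · unfold apply_rule_based_category apply_rule_based_category_alt; simp_all [pvCands, pvStep, List.foldl_cons, List.foldl_nil]
                                  ·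
                                    by_cases hps : PySem.Str.isIn "playstation network" desc = true
                                    · unfold apply_rule_based_category apply_rule_based_category_alt; simp_all [pvCands, pvStep, List.foldl_cons, List.foldl_nil]
                                    ·
                                      by_cases hbook : PySem.Str.isIn "booking.com" desc = true
                                      · unfold apply_rule_based_category apply_rule_based_category_alt; simp_all [pvCands, pvStep, List.foldl_cons, List.foldl_nil]
                                      ·
                                        by_cases hsala : PySem.Str.isIn "salamancayfiesta.com" desc = true
                                        · unfold apply_rule_based_category apply_rule_based_category_alt; simp_all [pvCands, pvStep, List.foldl_cons, List.foldl_nil]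
                                        ·
                                          by_cases hshein : PySem.Str.isIn "shein" desc = true
                                          · unfold apply_rule_based_category apply_rule_based_category_alt; simp_all [pvCands, pvStep, List.foldl_cons, List.foldl_nil]
                                          ·
                                            by_cases hes : PySem.Str.isIn "amazon.es" desc = true
                                            · unfold apply_rule_based_category apply_rule_based_category_alt; simp_all [pvCands, pvStep, List.foldl_cons, List.foldl_nil]
                                            ·
                                              by_cases hklarna : PySem.Str.isIn "klarna*pcdiga" desc = true
                                              · unfold apply_rule_based_category apply_rule_based_category_alt; simp_all [pvCands, pvStep, List.foldl_cons, List.foldl_nil]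
                                              ·
                                                by_cases hdoug : PySem.Str.isIn "douglas" desc = true
                                                · unfold apply_rule_based_category apply_rule_based_category_alt; simp_all [pvCands, pvStep, List.foldl_cons, List.foldl_nil]
                                                ·
                                                  by_cases hmoeve : PySem.Str.isIn "moeve" desc = true
                                                  · unfold apply_rule_based_category apply_rule_based_category_alt; simp_all [pvCands, pvStep, List.foldl_cons, List.foldl_nil]
                                                  ·
                                                    unfold apply_rule_based_category apply_rule_based_category_alt; simp_all [pvCands, pvStep, List.foldl_cons, List.foldl_nil]
    ·
      by_cases hflex : PySem.Str.isIn "to flexible cash funds" desc = true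
      · unfold apply_rule_based_category apply_rule_based_category_alt; simp_all [pvCands, pvStep, List.foldl_cons, List.foldl_nil]
      ·
        by_cases hrobo : PySem.Str.isIn "to robo portfolio" desc = true
        · unfold apply_rule_based_category apply_rule_based_category_alt; simp_all [pvCands, pvStep, List.foldl_cons, List.foldl_nil]
        ·
          by_cases hapt : PySem.Str.isIn "apple pay top-up" desc = true
          · unfold apply_rule_based_category apply_rule_based_category_alt; simp_all [pvCands, pvStep, List.foldl_cons, List.foldl_nil]
          ·
            by_cases htopup : PySem.Str.isIn "top-up" desc = true
            · unfold apply_rule_based_category apply_rule_based_category_alt; simp_all [pvCands, pvStep, List.foldl_cons, List.foldl_nil]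
            ·
              by_cases hsent : PySem.Str.isIn "sent from revolut" desc = true
              · unfold apply_rule_based_category apply_rule_based_category_alt; simp_all [pvCands, pvStep, List.foldl_cons, List.foldl_nil]
              ·
                by_cases hcash : PySem.Str.startswith desc "cash at" = true
                · have hB := pvAlt_cash desc direction hcash (by intro e he h4; fin_cases he <;> simp_all)
                  rw [hB]; unfold apply_rule_based_category; simp_all
                ·
                  by_cases huber : PySem.Str.isIn "uber" desc = true
                  · unfold apply_rule_based_category apply_rule_based_category_alt; simp_all [pvCands, pvStep, List.foldl_cons, List.foldl_nil]
                  ·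
                    by_cases hmcd : PySem.Str.isIn "mcdonalds" desc = true
                    · unfold apply_rule_based_category apply_rule_based_category_alt; simp_all [pvCands, pvStep, List.foldl_cons, List.foldl_nil]
                    ·
                      by_cases htasca : PySem.Str.isIn "tasca" desc = true
                      · unfold apply_rule_based_category apply_rule_based_category_alt; simp_all [pvCands, pvStep, List.foldl_cons, List.foldl_nil]
                      ·
                        by_cases hcap : PySem.Str.isIn "capicci" desc = true
                        · unfold apply_rule_based_category apply_rule_based_category_alt; simp_all [pvCands, pvStep, List.foldl_cons, List.foldl_nil]
                        ·
                          by_cases hbill : PySem.Str.isIn "apple.com/bill" desc = true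
                          · unfold apply_rule_based_category apply_rule_based_category_alt; simp_all [pvCands, pvStep, List.foldl_cons, List.foldl_nil]
                          ·
                            by_cases hspot : PySem.Str.isIn "spotify" desc = true
                            · unfold apply_rule_based_category apply_rule_based_category_alt; simp_all [pvCands, pvStep, List.foldl_cons, List.foldl_nil]
                            ·
                              by_cases hprime : PySem.Str.isIn "amazon prime" desc = true
                              · unfold apply_rule_based_category apply_rule_based_category_alt; simp_all [pvCands, pvStep, List.foldl_cons, List.foldl_nil]
                              ·
                                by_cases hjet : PySem.Str.isIn "jetbrains" desc = true
                                · unfold apply_rule_based_category apply_rule_based_category_alt; simp_all [pvCands, pvStep, List.foldl_cons, List.foldl_nil]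
                                ·
                                  by_cases hps : PySem.Str.isIn "playstation network" desc = true
                                  · unfold apply_rule_based_category apply_rule_based_category_alt; simp_all [pvCands, pvStep, List.foldl_cons, List.foldl_nil]
                                  ·
                                    by_cases hbook : PySem.Str.isIn "booking.com" desc = true
                                    · unfold apply_rule_based_category apply_rule_based_category_alt; simp_all [pvCands, pvStep, List.foldl_cons, List.foldl_nil]
                                    ·
                                      by_cases hsala : PySem.Str.isIn "salamancayfiesta.com" desc = true
                                      · unfold apply_rule_based_category apply_rule_based_category_alt; simp_all [pvCands, pvStep, List.foldl_cons, List.foldl_nil]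
                                      ·
                                        by_cases hshein : PySem.Str.isIn "shein" desc = true
                                        · unfold apply_rule_based_category apply_rule_based_category_alt; simp_all [pvCands, pvStep, List.foldl_cons, List.foldl_nil]
                                        ·
                                          by_cases hes : PySem.Str.isIn "amazon.es" desc = true
                                          · unfold apply_rule_based_category apply_rule_based_category_alt; simp_all [pvCands, pvStep, List.foldl_cons, List.foldl_nil]
                                          ·
                                            by_cases hklarna : PySem.Str.isIn "klarna*pcdiga" desc = true
                                            · unfold apply_rule_based_category apply_rule_based_category_alt; simp_all [pvCands, pvStep, List.foldl_cons, List.foldl_nil]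
                                            ·
                                              by_cases hdoug : PySem.Str.isIn "douglas" desc = true
                                              · unfold apply_rule_based_category apply_rule_based_category_alt; simp_all [pvCands, pvStep, List.foldl_cons, List.foldl_nil]
                                              ·
                                                by_cases hmoeve : PySem.Str.isIn "moeve" desc = true
                                                · unfold apply_rule_based_category apply_rule_based_category_alt; simp_all [pvCands, pvStep, List.foldl_cons, List.foldl_nil]
                                                ·
                                                  unfold apply_rule_based_category apply_rule_based_category_alt; simp_all [pvCands, pvStep, List.foldl_cons, List.foldl_nil]
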